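-- pv_equiv track=rewrite | github.com/Mateuslima18/prova2 | prova2.py | soma_positivos_no_intervalo
-- ===== SOURCE A (Python) =====
-- def soma_positivos_no_intervalo(a, b):
--
--     inicio = min(a, b)
--     fim = max(a, b)
--
--     soma = 0
--
--
--     for i in range(inicio, fim + 1):
--         if i > 0:
--             soma += i
--
--     return soma
-- ===== SOURCE B (Python) =====
-- def soma_positivos_no_intervalo(a, b):
--     lo = min(a, b)
--     hi = max(a, b)
--     if lo < 1:
--         lo = 1
--     if hi < lo:
--         return 0
--     return (lo + hi) * (hi - lo + 1) // 2
-- ===== Notes on version B (the rewrite author's own statement) =====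
-- stated objective: faster
-- what changed: Replaced the O(|b-a|) loop over range(min,max+1) by the closed-form arithmetic-series formula over the positive part [max(min(a,b),1), max(a,b)].
import Mathlib
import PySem

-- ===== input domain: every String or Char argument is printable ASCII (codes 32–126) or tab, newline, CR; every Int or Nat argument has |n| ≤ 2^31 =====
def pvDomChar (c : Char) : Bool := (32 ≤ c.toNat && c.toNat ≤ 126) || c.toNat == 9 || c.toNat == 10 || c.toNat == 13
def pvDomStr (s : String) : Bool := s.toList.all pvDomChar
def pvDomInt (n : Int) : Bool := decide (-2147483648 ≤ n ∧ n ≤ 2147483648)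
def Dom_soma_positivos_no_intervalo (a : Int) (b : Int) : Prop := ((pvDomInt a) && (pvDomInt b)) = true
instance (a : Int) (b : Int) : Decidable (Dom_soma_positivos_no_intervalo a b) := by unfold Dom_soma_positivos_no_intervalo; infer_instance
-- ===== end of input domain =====

-- B replaces A's O(|b-a|) loop by the O(1) closed-form arithmetic series over the positive part of the interval.

-- ===== PORT A =====
def soma_positivos_no_intervalo (a : Int) (b : Int) : Int :=
  let inicio := min a b
  let fim := max a b
  (PySem.List.pyRange inicio (fim + 1) 1).foldl
    (fun soma i => if i > 0 then soma + i else soma) 0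

-- ===== PORT B =====
def soma_positivos_no_intervalo_alt (a : Int) (b : Int) : Int :=
  let lo0 := min a b
  let hi := max a b
  let lo := if lo0 < 1 then 1 else lo0
  if hi < lo then 0
  else PySem.Int.floordiv ((lo + hi) * (hi - lo + 1)) 2

-- ===== PRECONDITION & SPEC =====
def Spec_soma_positivos_no_intervalo (a : Int) (b : Int) (out : Int) : Prop := out = soma_positivos_no_intervalo_alt a b
instance (a : Int) (b : Int) (out : Int) : Decidable (Spec_soma_positivos_no_intervalo a b out) := by unfold Spec_soma_positivos_no_intervalo; infer_instance

-- ===== CLAIM (what is proved, stated in full; the proofs are below) =====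
def Claim_equal_soma_positivos_no_intervalo : Prop := ∀ (a : Int) (b : Int), Dom_soma_positivos_no_intervalo a b → Spec_soma_positivos_no_intervalo a b (soma_positivos_no_intervalo a b)

-- ===== LEMMAS AND PROOFS =====

-- the loop body of A
theorem pv_step_nonpos (s : Int) {i : Int} (h : ¬ i > 0) :
    (if i > 0 then s + i else s) = s := by simp [h]

-- a fold over only-nonpositive elements keeps the accumulator
theorem pv_foldl_nonpos (l : List Int) (s : Int) (h : ∀ i ∈ l, ¬ i > 0) :
    l.foldl (fun soma i => if i > 0 then soma + i else soma) s = s := by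
  induction l generalizing s with
  | nil => rfl
  | cons x xs ih =>
    have hx : ¬ x > 0 := h x (by simp)
    simp only [List.foldl_cons, pv_step_nonpos s hx]
    exact ih s (fun i hi => h i (by simp [hi]))

theorem pv_even_prod (x y : Int) : (2 : Int) ∣ (x + y) * (y - x + 1) := by
  rcases Int.even_or_odd (x + y) with ⟨k, hk⟩ | ⟨k, hk⟩
  · exact Dvd.dvd.mul_right ⟨k, by omega⟩ _
  · exact Dvd.dvd.mul_left (⟨k + 1 - x, by omega⟩ : (2:Int) ∣ (y - x + 1)) _

-- closed form for the all-positive fold: lo ≥ 1, over pyRange lo (lo+n) 1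
theorem pv_sum_pos (n : Nat) : ∀ lo : Int, 1 ≤ lo →
    (PySem.List.pyRange lo (lo + n) 1).foldl
      (fun soma i => if i > 0 then soma + i else soma) 0
    = (if lo + (n:Int) - 1 < lo then 0
       else (lo + (lo + (n:Int) - 1)) * ((lo + (n:Int) - 1) - lo + 1) / 2) := by
  induction n with
  | zero =>
    intro lo hlo
    rw [PySem.List.pyRange_one_eq_nil (by omega)]
    simp only [List.foldl_nil]
    rw [if_pos (by push_cast; omega)]
  | succ n ih =>
    intro lo hlo
    have hsplit : PySem.List.pyRange lo (lo + (n + 1 : Nat)) 1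
        = PySem.List.pyRange lo (lo + (n:Int)) 1 ++ [lo + (n:Int)] := by
      have h := PySem.List.pyRange_one_succ_right (a := lo) (b := lo + (n:Int)) (by omega)
      push_cast
      rw [show lo + ((n:Int) + 1) = lo + (n:Int) + 1 by ring, h]
    rw [hsplit, List.foldl_append, ih lo hlo]
    have hpos : (lo + (n:Int)) > 0 := by omega
    simp only [List.foldl_cons, List.foldl_nil, if_pos hpos]
    rcases Nat.eq_zero_or_pos n with hn | hn
    · subst hn
      rw [if_pos (by omega), if_neg (by omega)]
      simp only [Nat.cast_zero, Nat.cast_one, add_zero, zero_add]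
      rw [show (lo + (lo + 1 - 1)) * (lo + 1 - 1 - lo + 1) = 2 * lo from by ring]
      omega
    · rw [if_neg (by omega), if_neg (by omega)]
      obtain ⟨k, hk⟩ := pv_even_prod lo (lo + (n:Int) - 1)
      obtain ⟨m, hm⟩ := pv_even_prod lo (lo + ((n:Int) + 1) - 1)
      have hrel : (lo + (lo + ((n:Int) + 1) - 1)) * ((lo + ((n:Int) + 1) - 1) - lo + 1)
          = (lo + (lo + (n:Int) - 1)) * ((lo + (n:Int) - 1) - lo + 1) + 2 * (lo + (n:Int)) := by
        ring
      push_cast at hk hm hrel ⊢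
      rw [hk, hm] at hrel
      rw [hk, hm, Int.mul_ediv_cancel_left k (by norm_num), Int.mul_ediv_cancel_left m (by norm_num)]
      omega

-- ===== VERDICT (by name: the statement is the Claim_ definition above) =====
theorem soma_positivos_no_intervalo_spec : Claim_equal_soma_positivos_no_intervalo := by
  intro a b _
  unfold Spec_soma_positivos_no_intervalo soma_positivos_no_intervalo soma_positivos_no_intervalo_alt
  show (PySem.List.pyRange (min a b) (max a b + 1) 1).foldl
      (fun soma i => if i > 0 then soma + i else soma) 0
    = (if max a b < (if min a b < 1 then 1 else min a b) then 0
       else PySem.Int.floordiv (((if min a b < 1 then 1 else min a b) + max a b)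
         * ((max a b) - (if min a b < 1 then 1 else min a b) + 1)) 2)
  set lo0 := min a b with hlo0
  set hi := max a b with hhi
  have hle : lo0 ≤ hi := min_le_max
  set lo := if lo0 < 1 then 1 else lo0 with hlo
  have hlo1 : 1 ≤ lo := by rw [hlo]; split_ifs <;> omega
  have hlo0lo : lo0 ≤ lo := by rw [hlo]; split_ifs <;> omega
  by_cases hvac : hi < lo
  · -- interval has no positive element
    rw [if_pos hvac]
    apply pv_foldl_nonpos
    intro i hi'
    rw [PySem.List.mem_pyRange_one] at hi'
    have : hi < 1 := by rw [hlo] at hvac; split_ifs at hvac <;> omega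
    omega
  · rw [not_lt] at hvac
    rw [if_neg (by omega)]
    have hsplit : PySem.List.pyRange lo0 (hi + 1) 1
        = PySem.List.pyRange lo0 lo 1 ++ PySem.List.pyRange lo (hi + 1) 1 :=
      PySem.List.pyRange_one_append lo0 lo (hi + 1) hlo0lo (by omega)
    rw [hsplit, List.foldl_append]
    rw [pv_foldl_nonpos _ 0 (by
      intro i hi'
      rw [PySem.List.mem_pyRange_one] at hi'
      rw [hlo] at hi'
      split_ifs at hi' <;> omega)]
    have hn : hi + 1 = lo + ((hi + 1 - lo).toNat : Int) := by omega
    rw [hn, pv_sum_pos (hi + 1 - lo).toNat lo hlo1]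
    have hc : ((hi + 1 - lo).toNat : Int) = hi + 1 - lo := by omega
    rw [hc, if_neg (by omega)]
    rw [PySem.Int.floordiv_eq_ediv_of_pos (by norm_num)]
    congr 1
    ring
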